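-- pv_equiv track=rewrite | github.com/Razvan2107/UBB_Sem1_FP | A Simple Console Menu/main.py | prop_1
-- ===== SOURCE A (Python) =====
-- def prim(n):
--     if n<2:
--         return False
--     elif n==2:
--         return True
--     elif n%2==0:
--         return False
--     else:
--         for i in range(3,n//2,2):
--             if n%i==0:
--                 return False
--     return True
--
-- def prop_1(lst):
--     x=0
--     maxi=0
--     list=[]
--     sol=[]
--     list.append(lst[0])
--     for i in range(1,len(lst)):
--         if prim(abs(lst[i]-lst[i-1]))==True:
--             x+=1
--             list.append(lst[i])
--             if x>maxi:
--                 maxi=x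
--                 sol = list.copy()
--         else:
--             x=0
--             list.clear()
--             list.append(lst[i])
--     return sol
-- ===== SOURCE B (Python) =====
-- def prim(n):
--     if n < 2:
--         return False
--     elif n == 2:
--         return True
--     elif n % 2 == 0:
--         return False
--     else:
--         for i in range(3, n // 2, 2):
--             if n % i == 0:
--                 return False
--     return True
--
--
-- def prop_1(lst):
--     # Pass 1: boolean table of prime adjacent differences (gap j is between lst[j] and lst[j+1]).
--     flags = [prim(abs(lst[j + 1] - lst[j])) for j in range(len(lst) - 1)]
--     # Pass 2: longest run of consecutive True flags, first run wins ties.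
--     best = 0
--     best_start = 0
--     cur = 0
--     for j in range(len(flags)):
--         if flags[j]:
--             cur += 1
--             if cur > best:
--                 best = cur
--                 best_start = j - cur + 1
--         else:
--             cur = 0
--     if best == 0:
--         return []
--     return lst[best_start:best_start + best + 1]
-- ===== Notes on version B (the rewrite author's own statement) =====
-- stated objective: alternative
-- what changed: A's single loop carrying a growing/cleared element buffer and a copied best solution is replaced by two separate passes: first a boolean table of prime adjacent differences, then a longest-run scan over that table that only records (best, best_start, cur) indices, the result being a slice of the input.
import Mathlib
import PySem

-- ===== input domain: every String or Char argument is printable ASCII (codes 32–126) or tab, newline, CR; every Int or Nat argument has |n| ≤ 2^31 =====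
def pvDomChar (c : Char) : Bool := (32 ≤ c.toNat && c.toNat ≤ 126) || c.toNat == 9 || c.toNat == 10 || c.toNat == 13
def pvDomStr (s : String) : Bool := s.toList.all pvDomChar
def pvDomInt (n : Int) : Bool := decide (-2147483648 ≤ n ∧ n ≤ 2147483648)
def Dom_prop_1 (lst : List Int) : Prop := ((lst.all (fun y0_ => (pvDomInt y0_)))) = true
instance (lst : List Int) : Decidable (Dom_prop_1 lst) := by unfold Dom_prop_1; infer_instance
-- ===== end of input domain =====

-- B replaces A's single accumulating loop (with its growing/cleared `list` buffer) by two passes: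
-- a boolean table of prime adjacent differences, then a longest-run scan over that table, returning
-- a slice of the input; same return value on every non-empty list (A raises IndexError on []).

-- ===== PORT A =====
-- 'for i in range(3, n//2, 2): if n % i == 0: return False' as the obvious tail recursion
def primLoop (n i : Int) : Bool :=
  if h : i < PySem.Int.floordiv n 2 then
    if PySem.Int.mod n i = 0 then false
    else primLoop n (i + 2)
  else true
termination_by (PySem.Int.floordiv n 2 - i).toNat
decreasing_by omega

def prim (n : Int) : Bool :=
  if n < 2 then false
  else if n = 2 then true
  else if PySem.Int.mod n 2 = 0 then false
  else primLoop n 3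

-- loop body of A's single for-loop; state (x, maxi, list, sol)
def stepA (lst : List Int) (s : Int × Int × List Int × List Int) (i : Int) :
    Int × Int × List Int × List Int :=
  if prim |PySem.List.pyGetD lst i 0 - PySem.List.pyGetD lst (i - 1) 0| then
    let x := s.1 + 1
    let l := s.2.2.1 ++ [PySem.List.pyGetD lst i 0]
    if x > s.2.1 then (x, x, l, l) else (x, s.2.1, l, s.2.2.2)
  else
    (0, s.2.1, [PySem.List.pyGetD lst i 0], s.2.2.2)

def prop_1 (lst : List Int) : List Int :=
  ((PySem.List.pyRange 1 (lst.length : Int) 1).foldl (stepA lst)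
      (0, 0, [PySem.List.pyGetD lst 0 0], [])).2.2.2

-- ===== PORT B =====
-- Source B's helper `prim` is byte-identical to A's, so its port is shared (see prim above)

-- pass 1: boolean table of prime adjacent differences
def mkFlags (lst : List Int) : List Bool :=
  (PySem.List.pyRange 0 ((lst.length : Int) - 1) 1).map
    (fun j => prim |PySem.List.pyGetD lst (j + 1) 0 - PySem.List.pyGetD lst j 0|)

-- pass 2 loop body: state (best, best_start, cur)
def stepB (flags : List Bool) (t : Int × Int × Int) (j : Int) : Int × Int × Int :=
  if PySem.List.pyGetD flags j false then
    let cur := t.2.2 + 1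
    if cur > t.1 then (cur, j - cur + 1, cur) else (t.1, t.2.1, cur)
  else (t.1, t.2.1, 0)

def prop_1_alt (lst : List Int) : List Int :=
  let flags := mkFlags lst
  let t := (PySem.List.pyRange 0 (flags.length : Int) 1).foldl (stepB flags) (0, 0, 0)
  if t.1 = 0 then [] else PySem.List.slice lst (some t.2.1) (some (t.2.1 + t.1 + 1))

-- ===== PRECONDITION & SPEC =====
-- Pre_ excludes only the empty list, on which A raises IndexError (lst[0]).
def Pre_prop_1 (lst : List Int) : Prop := lst ≠ []
instance (lst : List Int) : Decidable (Pre_prop_1 lst) := by unfold Pre_prop_1; infer_instance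

def pvWitness_prop_1 : List Int := ([1, 3, 6, 7])

def Spec_prop_1 (lst : List Int) (out : List Int) : Prop := out = prop_1_alt lst
instance (lst : List Int) (out : List Int) : Decidable (Spec_prop_1 lst out) := by unfold Spec_prop_1; infer_instance

-- ===== CLAIM (what is proved, stated in full; the proofs are below) =====
def Claim_equal_prop_1 : Prop := ∀ (lst : List Int), Dom_prop_1 lst → Pre_prop_1 lst → Spec_prop_1 lst (prop_1 lst)

-- ===== LEMMAS AND PROOFS =====

-- coupling invariant between A's fold state and B's scan state after m gaps
def InvP (lst : List Int) (m : Nat) (sA : Int × Int × List Int × List Int)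
    (sB : Int × Int × Int) : Prop :=
  ∃ b s c : Nat, sB = ((b : Int), (s : Int), (c : Int)) ∧
    c ≤ m ∧ s + b ≤ m ∧
    sA.1 = (c : Int) ∧ sA.2.1 = (b : Int) ∧
    sA.2.2.1 = (lst.drop (m - c)).take (c + 1) ∧
    sA.2.2.2 = (if b = 0 then [] else (lst.drop s).take (b + 1))

lemma take_succ_drop (l : List Int) (a c : Nat) (h : a + c < l.length) :
    (l.drop a).take (c + 1) = (l.drop a).take c ++ [l[a + c]] := by
  rw [List.take_add_one, List.getElem?_drop, List.getElem?_eq_getElem h]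
  rfl

lemma drop_take_one (l : List Int) (k : Nat) (hk : k < l.length) :
    (l.drop k).take 1 = [l[k]] := by
  simpa using take_succ_drop l k 0 (by omega)

lemma pyGetD_succ_nat (lst : List Int) (m : Nat) (h : m + 1 < lst.length) :
    PySem.List.pyGetD lst ((m : Int) + 1) 0 = lst[m + 1] := by
  rw [show ((m : Int) + 1) = ((m + 1 : Nat) : Int) by push_cast; ring,
    PySem.List.pyGetD_natCast, List.getD_eq_getElem _ _ h]

lemma inv_main (lst : List Int) (m : Nat) (hm : (m : Int) ≤ (lst.length : Int) - 1) :
    InvP lst m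
      ((PySem.List.pyRange 1 (1 + (m : Int)) 1).foldl (stepA lst)
        (0, 0, [PySem.List.pyGetD lst 0 0], []))
      ((PySem.List.pyRange 0 (m : Int) 1).foldl (stepB (mkFlags lst)) (0, 0, 0)) := by
  induction m with
  | zero =>
    rw [show (1 + ((0 : Nat) : Int)) = 1 by norm_num,
      PySem.List.pyRange_one_eq_nil (le_refl (1 : Int)),
      show (((0 : Nat)) : Int) = 0 by norm_num,
      PySem.List.pyRange_one_eq_nil (le_refl (0 : Int))]
    simp only [List.foldl_nil]
    have hlen : 0 < lst.length := by omega
    refine ⟨0, 0, 0, by norm_num, by omega, by omega, rfl, rfl, ?_, by simp⟩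
    cases lst with
    | nil => simp at hlen
    | cons a t => simp [PySem.List.pyGetD_zero]
  | succ m ih =>
    have hm1 : (m : Int) + 1 ≤ (lst.length : Int) - 1 := by push_cast at hm; omega
    have hmn : m + 1 < lst.length := by omega
    rw [show (1 + ((m + 1 : Nat) : Int)) = (1 + (m : Int)) + 1 by push_cast; ring,
      PySem.List.pyRange_one_succ_right (by omega),
      show (((m + 1 : Nat)) : Int) = (m : Int) + 1 by push_cast; ring,
      PySem.List.pyRange_one_succ_right (by omega),
      List.foldl_append, List.foldl_append]
    simp only [List.foldl_cons, List.foldl_nil]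
    set FA := (PySem.List.pyRange 1 (1 + (m : Int)) 1).foldl (stepA lst)
        (0, 0, [PySem.List.pyGetD lst 0 0], []) with hFA
    set FB := (PySem.List.pyRange 0 (m : Int) 1).foldl (stepB (mkFlags lst)) (0, 0, 0) with hFB
    obtain ⟨b, s, c, hsB, hc, hsb, hx, hmax, hl, hsol⟩ := ih (by omega)
    have hflag : PySem.List.pyGetD (mkFlags lst) (m : Int) false
        = prim |PySem.List.pyGetD lst ((m : Int) + 1) 0 - PySem.List.pyGetD lst (m : Int) 0| := by
      unfold mkFlags
      rw [PySem.List.pyGetD_map_pyRange_of_nonneg _ _ _ _ (by positivity) (by omega)]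
    have hval := pyGetD_succ_nat lst m hmn
    unfold InvP
    rw [hsB]
    simp only [stepA, stepB]
    rw [hflag, show (1 : Int) + (m : Int) - 1 = (m : Int) by ring,
      show (1 : Int) + (m : Int) = (m : Int) + 1 by ring, hx, hmax]
    have hl' : FA.2.2.1 ++ [PySem.List.pyGetD lst ((m : Int) + 1) 0]
        = (lst.drop (m - c)).take (c + 1 + 1) := by
      rw [hl, hval, take_succ_drop lst (m - c) (c + 1) (by omega),
        take_succ_drop lst (m - c) c (by omega)]
      simp only [show m - c + (c + 1) = m + 1 from by omega,
        show m - c + c = m from by omega]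
    by_cases hf : prim |PySem.List.pyGetD lst ((m : Int) + 1) 0 - PySem.List.pyGetD lst (m : Int) 0| = true
    · rw [if_pos hf, if_pos hf]
      by_cases hgt : (c : Int) + 1 > (b : Int)
      · rw [if_pos hgt, if_pos hgt]
        refine ⟨c + 1, m - c, c + 1, by simp only [Prod.mk.injEq]; omega,
          by omega, by omega, by push_cast; ring, by push_cast; ring, ?_, ?_⟩
        · simpa using hl'
        · rw [if_neg (by omega : ¬ c + 1 = 0)]
          simpa using hl'
      · rw [if_neg hgt, if_neg hgt]
        refine ⟨b, s, c + 1, by simp, by omega, by omega,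
          by show ((c : Int) + 1) = ((c + 1 : Nat) : Int); push_cast; ring, rfl, ?_,
          by show FA.2.2.2 = _; exact hsol⟩
        show FA.2.2.1 ++ [PySem.List.pyGetD lst ((m : Int) + 1) 0]
          = List.take (c + 1 + 1) (List.drop (m + 1 - (c + 1)) lst)
        rw [show m + 1 - (c + 1) = m - c from by omega]
        exact hl'
    · rw [if_neg hf, if_neg hf]
      refine ⟨b, s, 0, by simp, by omega, by omega, by show (0 : Int) = ((0 : Nat) : Int); norm_num,
        rfl, ?_, by show FA.2.2.2 = _; exact hsol⟩
      show [PySem.List.pyGetD lst ((m : Int) + 1) 0] = List.take (0 + 1) (List.drop (m + 1 - 0) lst)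
      rw [hval, show m + 1 - 0 = m + 1 from rfl, drop_take_one lst (m + 1) hmn]

-- ===== VERDICT (by name: the statement is the Claim_ definition above) =====
theorem prop_1_spec : Claim_equal_prop_1 := by
  intro lst _ hpre
  unfold Spec_prop_1
  have hlen : 1 ≤ lst.length := List.length_pos_of_ne_nil hpre
  obtain ⟨b, s, c, hsB, hc, hsb, hx, hmax, hl, hsol⟩ :=
    inv_main lst (lst.length - 1) (by omega)
  have e1 : (lst.length : Int) = 1 + ((lst.length - 1 : Nat) : Int) := by omega
  have e2 : ((mkFlags lst).length : Int) = ((lst.length - 1 : Nat) : Int) := by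
    unfold mkFlags
    rw [List.length_map, PySem.List.length_pyRange_one]
    push_cast [Int.toNat_of_nonneg (by omega : (0 : Int) ≤ (lst.length : Int) - 1 - 0)]
    omega
  simp only [prop_1, prop_1_alt]
  rw [e1, e2, hsB, hsol]
  simp only []
  by_cases hb : b = 0
  · simp [hb]
  · rw [if_neg hb, if_neg (show ¬((b : Nat) : Int) = 0 from by exact_mod_cast hb),
      show (s : Int) + (b : Int) + 1 = ((s + b + 1 : Nat) : Int) by push_cast; ring,
      PySem.List.slice_natCast]
    congr 1
    omega
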